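-- pv_equiv track=rewrite | github.com/aorursy/KT_dataset_py | murilospinoza_aplp-aula4-exercicio1.py | f
-- ===== SOURCE A (Python) =====
-- def f(n):
--     if n == 1:
--         n = 2
--     elif n == 2:
--         n = 1
--     else:
--         n = 2 * f(n-1) + g(n-2)
--     return n
--
-- def g(n):
--     if n >= 3:
--         n = g(n-1) + 3 * f(n-2)
--     return n
-- ===== SOURCE B (Python) =====
-- def f(n):
--     # Bottom-up DP: one pass keeping the last two values of both sequences.
--     if n == 1:
--         return 2
--     if n == 2:
--         return 1
--     f1, f2, g1, g2 = 1, 2, 2, 1  # f(2), f(1), g(2), g(1)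
--     for _ in range(3, n + 1):
--         fk = 2 * f1 + g2
--         gk = g1 + 3 * f2
--         f1, f2, g1, g2 = fk, f1, gk, g1
--     return f1
-- ===== Notes on version B (the rewrite author's own statement) =====
-- stated objective: faster
-- what changed: Replaced the exponential mutual recursion of f and g by a single bottom-up loop that keeps only the last two values of each sequence; intended as asymptotically faster (a timing run measured B 154x at the largest size both finished; A timed out on larger inputs).
-- outside the precondition, e.g. on f(0): A raises RecursionError, B returns 1
import Mathlib
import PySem

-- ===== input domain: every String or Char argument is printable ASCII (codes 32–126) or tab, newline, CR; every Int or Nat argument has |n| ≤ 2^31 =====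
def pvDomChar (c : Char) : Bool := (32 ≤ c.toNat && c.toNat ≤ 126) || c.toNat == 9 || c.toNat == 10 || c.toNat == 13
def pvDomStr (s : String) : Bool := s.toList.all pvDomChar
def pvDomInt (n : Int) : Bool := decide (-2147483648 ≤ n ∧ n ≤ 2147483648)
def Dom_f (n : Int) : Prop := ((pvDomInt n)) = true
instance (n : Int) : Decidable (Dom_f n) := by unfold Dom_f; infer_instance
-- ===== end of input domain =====

-- B replaces A's mutual recursion by one bottom-up pass keeping the last two
-- values of both sequences; intended as faster (measured 154x at the largest
-- size both finished; A timed out beyond).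

-- ===== PORT A =====
-- A's mutual recursion, made total with a fuel argument; fuel n.toNat bounds the
-- recursion depth, so the port is exact wherever Python returns (n ≥ 1 = Pre_f).
mutual
  def fFuel : Nat → Int → Int
    | 0, _ => 0
    | k+1, n => if n = 1 then 2 else if n = 2 then 1 else 2 * fFuel k (n-1) + gFuel k (n-2)
  def gFuel : Nat → Int → Int
    | 0, n => n
    | k+1, n => if 3 ≤ n then gFuel k (n-1) + 3 * fFuel k (n-2) else n
end

def f (n : Int) : Int := fFuel n.toNat n

-- ===== PORT B =====
def f_alt (n : Int) : Int :=
  if n = 1 then 2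
  else if n = 2 then 1
  else
    (((PySem.List.pyRange 3 (n+1) 1).foldl
        (fun (st : Int × Int × Int × Int) _ =>
          (2 * st.1 + st.2.2.2, st.1, st.2.2.1 + 3 * st.2.1, st.2.2.1))
        (1, 2, 2, 1))).1

-- ===== PRECONDITION & SPEC =====
-- Pre_f excludes n ≤ 0, where A recurses without a base case (RecursionError).
def Pre_f (n : Int) : Prop := 1 ≤ n
instance (n : Int) : Decidable (Pre_f n) := by unfold Pre_f; infer_instance
def pvWitness_f : Int := 5
def Spec_f (n : Int) (out : Int) : Prop := out = f_alt n
instance (n : Int) (out : Int) : Decidable (Spec_f n out) := by unfold Spec_f; infer_instance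

-- ===== CLAIM (what is proved, stated in full; the proofs are below) =====
def Claim_equal_f : Prop := ∀ (n : Int), Dom_f n → Pre_f n → Spec_f n (f n)

-- ===== LEMMAS AND PROOFS =====

-- the loop body of B as a function on the 4-tuple state
def pvStep (st : Int × Int × Int × Int) : Int × Int × Int × Int :=
  (2 * st.1 + st.2.2.2, st.1, st.2.2.1 + 3 * st.2.1, st.2.2.1)

-- state of B's loop after m iterations
def pvD : Nat → Int × Int × Int × Int
  | 0 => (1, 2, 2, 1)
  | m+1 => pvStep (pvD m)

-- the mathematical sequences f, g (1-indexed)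
def pvF (j : Nat) : Int := (pvD (j-1)).2.1
def pvG (j : Nat) : Int := (pvD (j-1)).2.2.2

lemma pvF_succ2 (j : Nat) : pvF (j+2) = (pvD j).1 := by
  simp [pvF, pvD, pvStep]

lemma pvF_rec (m : Nat) : pvF (m+3) = 2 * pvF (m+2) + pvG (m+1) := by
  simp [pvF, pvG, pvD, pvStep]

lemma pvG_rec (m : Nat) : pvG (m+3) = pvG (m+2) + 3 * pvF (m+1) := by
  simp [pvF, pvG, pvD, pvStep]

-- correctness of A's fuel recursion against the sequences
lemma fuel_correct : ∀ k : Nat,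
    (∀ n : Int, 1 ≤ n → n.toNat ≤ k → fFuel k n = pvF n.toNat) ∧
    (∀ n : Int, 1 ≤ n → (n-1).toNat ≤ k → gFuel k n = pvG n.toNat) := by
  intro k
  induction k with
  | zero =>
    constructor
    · intro n h1 h2; omega
    · intro n h1 h2
      have hn : n = 1 := by omega
      subst hn; decide
  | succ k ih =>
    obtain ⟨ihf, ihg⟩ := ih
    constructor
    · intro n h1 h2
      by_cases e1 : n = 1
      · subst e1
        have h : fFuel (k+1) 1 = 2 := by simp [fFuel]
        rw [h]; decide
      · by_cases e2 : n = 2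
        · subst e2
          have h : fFuel (k+1) 2 = 1 := by simp [fFuel]
          rw [h]; decide
        · have h3 : 3 ≤ n := by omega
          obtain ⟨m, hm⟩ : ∃ m : Nat, n = (m : Int) + 3 := ⟨(n-3).toNat, by omega⟩
          have hf := ihf (n-1) (by omega) (by omega)
          have hg := ihg (n-2) (by omega) (by omega)
          simp only [fFuel, if_neg e1, if_neg e2, hf, hg]
          have h1' : (n-1).toNat = m + 2 := by omega
          have h2' : (n-2).toNat = m + 1 := by omega
          have h0' : n.toNat = m + 3 := by omega
          rw [h1', h2', h0', pvF_rec]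
    · intro n h1 h2
      by_cases h3 : 3 ≤ n
      · obtain ⟨m, hm⟩ : ∃ m : Nat, n = (m : Int) + 3 := ⟨(n-3).toNat, by omega⟩
        have hg := ihg (n-1) (by omega) (by omega)
        have hf := ihf (n-2) (by omega) (by omega)
        simp only [gFuel, if_pos h3, hg, hf]
        have h1' : (n-1).toNat = m + 2 := by omega
        have h2' : (n-2).toNat = m + 1 := by omega
        have h0' : n.toNat = m + 3 := by omega
        rw [h1', h2', h0', pvG_rec]
      · have : n = 1 ∨ n = 2 := by omega
        rcases this with rfl | rfl
        · have h : gFuel (k+1) 1 = 1 := by simp [gFuel]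
          rw [h]; decide
        · have h : gFuel (k+1) 2 = 2 := by simp [gFuel]
          rw [h]; decide

-- B's loop after running up to bound (m:Int)+3+1 equals pvD (m+1)
lemma fold_eq_pvD : ∀ m : Nat,
    (PySem.List.pyRange 3 ((m : Int) + 3 + 1) 1).foldl (fun st _ => pvStep st) (1, 2, 2, 1)
      = pvD (m + 1) := by
  intro m
  induction m with
  | zero => decide
  | succ m ih =>
    have h : (3 : Int) ≤ (m : Int) + 4 := by omega
    push_cast
    have he : ((m : Int) + 1 + 3 + 1) = ((m : Int) + 4) + 1 := by ring
    rw [he, PySem.List.pyRange_one_succ_right h, List.foldl_append]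
    have he2 : ((m : Int) + 4) = ((m : Int) + 3 + 1) := by ring
    rw [he2, ih]
    rfl

lemma f_alt_eq (n : Int) (h : 1 ≤ n) : f_alt n = pvF n.toNat := by
  by_cases e1 : n = 1
  · subst e1; decide
  · by_cases e2 : n = 2
    · subst e2; decide
    · have h3 : 3 ≤ n := by omega
      obtain ⟨m, hm⟩ : ∃ m : Nat, n = (m : Int) + 3 := ⟨(n-3).toNat, by omega⟩
      have h0' : n.toNat = m + 3 := by omega
      subst hm
      simp only [f_alt, if_neg e1, if_neg e2]
      have := fold_eq_pvD m
      simp only [pvStep] at this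
      rw [this, h0']
      have : pvF (m + 3) = (pvD (m+1)).1 := pvF_succ2 (m+1)
      rw [this]

-- ===== VERDICT (by name: the statement is the Claim_ definition above) =====
theorem f_spec : Claim_equal_f := by
  intro n _ hpre
  unfold Spec_f f
  rw [f_alt_eq n hpre]
  exact (fuel_correct n.toNat).1 n hpre (le_refl _)
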